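-- pv_equiv track=rewrite | github.com/GraysenT/hedge-fund-ai | cosmology/strategy_cosmos_explorer.py | build_strategy_constellation_map
-- ===== SOURCE A (Python) =====
-- def build_strategy_constellation_map(strategies):
--     """
--     Creates a network graph of strategies by type, logic similarity, and evolution path.
--     """
--     constellation = {}
--     for strat in strategies:
--         cluster = strat.get("class", "misc")
--         if cluster not in constellation:
--             constellation[cluster] = []
--         constellation[cluster].append(strat["name"])
--     return constellation
-- ===== SOURCE B (Python) =====
-- def build_strategy_constellation_map(strategies):
--     # Two-pass grouping: collect distinct cluster keys in first-appearance
--     # order, then build each group by filtering the whole list per key.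
--     clusters = []
--     for strat in strategies:
--         c = strat.get("class", "misc")
--         if c not in clusters:
--             clusters.append(c)
--     return {c: [strat["name"] for strat in strategies
--                 if strat.get("class", "misc") == c]
--             for c in clusters}
-- ===== Notes on version B (the rewrite author's own statement) =====
-- stated objective: alternative
-- what changed: Replaces the single-pass dict-append grouping with a key-collection pass followed by a per-key filter over the whole list (a dict comprehension), trading an O(n) incremental build for an O(n*k) scan with no mutable dict.
import Mathlib
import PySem

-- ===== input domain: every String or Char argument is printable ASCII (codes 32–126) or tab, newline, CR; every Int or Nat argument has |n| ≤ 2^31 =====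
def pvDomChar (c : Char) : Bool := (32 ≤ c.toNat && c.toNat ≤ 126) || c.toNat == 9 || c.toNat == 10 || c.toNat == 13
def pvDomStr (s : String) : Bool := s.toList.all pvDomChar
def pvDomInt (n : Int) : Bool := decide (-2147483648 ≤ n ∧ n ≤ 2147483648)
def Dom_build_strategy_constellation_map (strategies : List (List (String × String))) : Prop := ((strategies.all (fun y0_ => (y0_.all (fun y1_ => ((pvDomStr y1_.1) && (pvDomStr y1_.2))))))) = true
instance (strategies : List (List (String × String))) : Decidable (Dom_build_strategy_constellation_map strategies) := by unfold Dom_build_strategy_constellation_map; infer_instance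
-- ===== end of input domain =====

-- B groups by a key-collection pass plus a per-key filter instead of A's single-pass
-- dict-append build; return values agree on every input where A returns (Pre_ excludes
-- the KeyError inputs, on which both Pythons raise).

-- ===== PORT A =====
-- strat.get("class", "misc") on an association-list dict (first match)
def pvCluster (strat : List (String × String)) : String :=
  (PySem.Dict.mk strat).getD "class" "misc"

-- strat["name"]; Python raises KeyError when "name" is missing — those inputs are
-- excluded by Pre_; the "" default is only for totality and is never reached under Pre_.
def pvName (strat : List (String × String)) : String :=
  (PySem.Dict.mk strat).getD "name" ""

def build_strategy_constellation_map (strategies : List (List (String × String))) : List (String × List String) :=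
  (strategies.foldl
    (fun constellation strat =>
      let cluster := pvCluster strat
      let constellation :=
        if constellation.contains cluster then constellation
        else constellation.insert cluster ([] : List String)
      constellation.modify cluster [] (fun l => l ++ [pvName strat]))
    PySem.Dict.empty).items

-- ===== PORT B =====
def build_strategy_constellation_map_alt (strategies : List (List (String × String))) : List (String × List String) :=
  let clusters : List String :=
    strategies.foldl
      (fun ks strat =>
        let c := pvCluster strat
        if ks.contains c then ks else ks ++ [c])
      []
  clusters.map (fun c =>
    (c, (strategies.filter (fun strat => pvCluster strat == c)).map pvName))

-- ===== PRECONDITION & SPEC =====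
-- Pre_ excludes exactly the inputs on which the Python A raises KeyError: some
-- element without a "name" key (B raises there too).
def Pre_build_strategy_constellation_map (strategies : List (List (String × String))) : Prop :=
  ∀ strat ∈ strategies, "name" ∈ strat.map Prod.fst
instance (strategies : List (List (String × String))) : Decidable (Pre_build_strategy_constellation_map strategies) := by unfold Pre_build_strategy_constellation_map; infer_instance

def pvWitness_build_strategy_constellation_map : (List (List (String × String))) :=
  [[("class", "alpha"), ("name", "s1")], [("name", "s2")], [("class", "alpha"), ("name", "s3")]]

def Spec_build_strategy_constellation_map (strategies : List (List (String × String))) (out : List (String × List String)) : Prop := out = build_strategy_constellation_map_alt strategies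
instance (strategies : List (List (String × String))) (out : List (String × List String)) : Decidable (Spec_build_strategy_constellation_map strategies out) := by unfold Spec_build_strategy_constellation_map; infer_instance

-- ===== CLAIM (what is proved, stated in full; the proofs are below) =====
def Claim_equal_build_strategy_constellation_map : Prop := ∀ (strategies : List (List (String × String))), Dom_build_strategy_constellation_map strategies → Pre_build_strategy_constellation_map strategies → Spec_build_strategy_constellation_map strategies (build_strategy_constellation_map strategies)

-- ===== LEMMAS AND PROOFS =====

-- A's "ensure key, then append" step is the plain modify-append step.
theorem pv_step_eq (d : PySem.Dict String (List String)) (k : String) (v : String) :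
    (let d' := if d.contains k then d else d.insert k ([] : List String)
     d'.modify k [] (fun l => l ++ [v])) = d.modify k [] (fun l => l ++ [v]) := by
  by_cases h : d.contains k
  · simp [h]
  · simp only [Bool.not_eq_true] at h
    simp only [h, Bool.false_eq_true, if_false]
    unfold PySem.Dict.modify
    rw [PySem.Dict.getD_insert_self, PySem.Dict.insert_insert_self,
        PySem.Dict.getD_of_not_contains _ _ h]

-- A's whole fold is the modify-append fold over (cluster, name) pairs.
theorem pv_fold_eq (strategies : List (List (String × String))) :
    build_strategy_constellation_map strategies =
      ((strategies.map (fun s => (pvCluster s, pvName s))).foldl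
        (fun d p => d.modify p.1 [] (fun l => l ++ [p.2])) PySem.Dict.empty).items := by
  unfold build_strategy_constellation_map
  rw [List.foldl_map]
  congr 1
  apply PySem.List.foldl_congr_mem
  intro d s _
  exact pv_step_eq d (pvCluster s) (pvName s)

theorem build_strategy_constellation_map_eq_alt (strategies : List (List (String × String))) :
    build_strategy_constellation_map strategies = build_strategy_constellation_map_alt strategies := by
  rw [pv_fold_eq]
  -- B's key-collection loop is Set.ofList of the clusters (Set.add is that if-append)
  show _ = List.map
      (fun c => (c, List.map pvName (List.filter (fun strat => pvCluster strat == c) strategies)))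
      (List.foldl (fun ks strat => PySem.Set.add ks (pvCluster strat)) [] strategies)
  rw [← PySem.Set.update_map_eq_foldl_add strategies pvCluster [],
      PySem.Set.update_nil_left]
  -- A's dict: keys and per-key values
  have hkeys : ((strategies.map (fun s => (pvCluster s, pvName s))).foldl
      (fun d p => d.modify p.1 [] (fun l => l ++ [p.2])) PySem.Dict.empty).keys
      = PySem.Set.ofList (strategies.map pvCluster) := by
    rw [PySem.Dict.keys_foldl_modify_key (strategies.map (fun s => (pvCluster s, pvName s)))
          Prod.fst ([] : List String) (fun _ p l => l ++ [p.2]) PySem.Dict.empty]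
    simp only [PySem.Dict.keys_empty, PySem.Set.update_nil_left, List.map_map]
    rfl
  have hnodup : ((strategies.map (fun s => (pvCluster s, pvName s))).foldl
      (fun d p => d.modify p.1 [] (fun l => l ++ [p.2])) PySem.Dict.empty).keys.Nodup := by
    rw [hkeys]; exact PySem.Set.nodup_ofList _
  rw [PySem.Dict.items_eq_map_keys _ hnodup ([] : List String), hkeys]
  apply List.map_congr_left
  intro c _
  rw [PySem.Dict.getD_foldl_modify_append, PySem.Dict.getD_empty, List.nil_append,
      List.filter_map, List.map_map]
  rfl

-- ===== VERDICT (by name: the statement is the Claim_ definition above) =====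
theorem build_strategy_constellation_map_spec : Claim_equal_build_strategy_constellation_map := by
  intro strategies _ _
  unfold Spec_build_strategy_constellation_map
  exact build_strategy_constellation_map_eq_alt strategies
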